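-- pv_equiv track=rewrite | github.com/iraros/whisper-transcriber | logic.py | split_line_balanced
-- ===== SOURCE A (Python) =====
-- def split_line_balanced(words):
--     lens = [len(word) for word in words]
--     for i in range(1, len(words)):
--         current_diff = abs(sum(lens[:i]) - sum(lens[i:]))
--         previous_diff = abs(sum(lens[:i - 1]) - sum(lens[i - 1:]))
--         if current_diff >= previous_diff:
--             return ' '.join(words[:i - 1]), ' '.join(words[i - 1:])
--     return ' '.join(words), ''
-- ===== SOURCE B (Python) =====
-- def split_line_balanced(words):
--     total = sum(len(w) for w in words)
--     prefix = 0
--     for k in range(len(words) - 1):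
--         nxt = prefix + len(words[k])
--         if abs(2 * nxt - total) >= abs(2 * prefix - total):
--             return ' '.join(words[:k]), ' '.join(words[k:])
--         prefix = nxt
--     return ' '.join(words), ''
-- ===== Notes on version B (the rewrite author's own statement) =====
-- stated objective: faster
-- what changed: Replaces the per-iteration recomputation of four list-slice sums with a single running prefix sum (diff = 2*prefix - total), turning the quadratic scan into one linear pass.
import Mathlib
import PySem

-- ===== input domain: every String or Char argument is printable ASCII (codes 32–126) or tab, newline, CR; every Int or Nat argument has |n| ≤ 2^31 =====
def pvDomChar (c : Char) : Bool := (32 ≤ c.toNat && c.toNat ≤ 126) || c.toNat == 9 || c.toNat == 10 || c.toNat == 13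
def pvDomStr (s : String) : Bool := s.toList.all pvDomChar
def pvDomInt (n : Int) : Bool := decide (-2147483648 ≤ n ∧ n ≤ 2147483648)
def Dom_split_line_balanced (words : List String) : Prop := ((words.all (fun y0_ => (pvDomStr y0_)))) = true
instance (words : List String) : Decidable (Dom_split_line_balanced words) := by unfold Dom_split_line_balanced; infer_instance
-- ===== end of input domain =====

-- B replaces A's per-iteration slice sums with one running prefix sum (asymptotically faster, same return values).


-- ===== PORT A =====
-- loop 'for i in range(1, len(words))' with early return, recomputing slice sums each step
def pvALoop (words : List String) (lens : List Int) : List Int → String × String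
  | [] => (PySem.Str.join " " words, "")
  | i :: rest =>
    let currentDiff := |(PySem.List.slice lens none (some i)).sum - (PySem.List.slice lens (some i) none).sum|
    let previousDiff := |(PySem.List.slice lens none (some (i - 1))).sum - (PySem.List.slice lens (some (i - 1)) none).sum|
    if currentDiff ≥ previousDiff then
      (PySem.Str.join " " (PySem.List.slice words none (some (i - 1))),
       PySem.Str.join " " (PySem.List.slice words (some (i - 1)) none))
    else pvALoop words lens rest

def split_line_balanced (words : List String) : String × String :=
  let lens := words.map PySem.Str.len
  pvALoop words lens (PySem.List.pyRange 1 (words.length : Int) 1)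

-- ===== PORT B =====
-- loop 'for k in range(len(words)-1)' carrying the running prefix sum
def pvBLoop (words : List String) (total : Int) : List Int → Int → String × String
  | [], _ => (PySem.Str.join " " words, "")
  | k :: rest, prefixSum =>
    let nxt := prefixSum + PySem.Str.len (PySem.List.pyGetD words k "")
    if |2 * nxt - total| ≥ |2 * prefixSum - total| then
      (PySem.Str.join " " (PySem.List.slice words none (some k)),
       PySem.Str.join " " (PySem.List.slice words (some k) none))
    else pvBLoop words total rest nxt

def split_line_balanced_alt (words : List String) : String × String :=
  let total := (words.map PySem.Str.len).sum
  pvBLoop words total (PySem.List.pyRange 0 ((words.length : Int) - 1) 1) 0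

-- ===== PRECONDITION & SPEC =====
def Spec_split_line_balanced (words : List String) (out : String × String) : Prop := out = split_line_balanced_alt words
instance (words : List String) (out : String × String) : Decidable (Spec_split_line_balanced words out) := by unfold Spec_split_line_balanced; infer_instance

-- ===== CLAIM (what is proved, stated in full; the proofs are below) =====
def Claim_equal_split_line_balanced : Prop := ∀ (words : List String), Dom_split_line_balanced words → Spec_split_line_balanced words (split_line_balanced words)

-- ===== LEMMAS AND PROOFS =====


lemma pv_diff (xs : List Int) (m : Nat) :
    (xs.take m).sum - (xs.drop m).sum = 2 * (xs.take m).sum - xs.sum := by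
  have h : (xs.take m).sum + (xs.drop m).sum = xs.sum := by
    rw [← List.sum_append, List.take_append_drop]
  omega

lemma pv_slice_nat {A : Type} (m : Nat) (xs : List A) :
    PySem.List.slice xs none (some (m : Int)) = xs.take m ∧
    PySem.List.slice xs (some (m : Int)) none = xs.drop m := by
  constructor
  · rw [PySem.List.slice_to xs (Int.natCast_nonneg m)]; simp
  · rw [PySem.List.slice_from xs (Int.natCast_nonneg m)]; simp

lemma pv_loop_eq (words : List String) (fuel : Nat) : ∀ (k : Nat), k ≤ words.length → words.length - k ≤ fuel →
    pvALoop words (words.map PySem.Str.len) (PySem.List.pyRange ((k : Int) + 1) (words.length : Int) 1)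
      = pvBLoop words ((words.map PySem.Str.len).sum) (PySem.List.pyRange (k : Int) ((words.length : Int) - 1) 1)
          (((words.take k).map PySem.Str.len).sum) := by
  induction fuel with
  | zero =>
    intro k hk hf
    have hke : k = words.length := by omega
    subst hke
    rw [PySem.List.pyRange_one_eq_nil (by omega),
        PySem.List.pyRange_one_eq_nil (by omega)]
    simp [pvALoop, pvBLoop]
  | succ fuel ih =>
    intro k hk hf
    by_cases hend : words.length ≤ k + 1
    · rw [PySem.List.pyRange_one_eq_nil (by omega),
          PySem.List.pyRange_one_eq_nil (by omega)]
      simp [pvALoop, pvBLoop]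
    · rw [not_le] at hend
      have hklt : k < words.length := by omega
      rw [PySem.List.pyRange_one_cons (show (k : Int) + 1 < (words.length : Int) by omega),
          PySem.List.pyRange_one_cons (show (k : Int) < (words.length : Int) - 1 by omega)]
      simp only [pvALoop, pvBLoop]
      have hc0 : (k : Int) + 1 - 1 = (k : Int) := by ring
      have hcast1 : ((k : Int) + 1) = ((k + 1 : Nat) : Int) := by push_cast; ring
      obtain ⟨htw, hdw⟩ := pv_slice_nat k words
      obtain ⟨htl, hdl⟩ := pv_slice_nat k (words.map PySem.Str.len)
      obtain ⟨htl1, hdl1⟩ := pv_slice_nat (k + 1) (words.map PySem.Str.len)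
      rw [hc0, hcast1, htw, hdw, htl, hdl, htl1, hdl1]
      have hget : PySem.List.pyGetD words ((k : Nat) : Int) "" = words[k] := by
        rw [PySem.List.pyGetD_natCast]
        exact List.getD_eq_getElem _ _ hklt
      rw [hget]
      have hgk : (List.map PySem.Str.len words)[k]'(by simpa using hklt) = PySem.Str.len words[k] := by
        simp
      have hS1 : (List.take k (List.map PySem.Str.len words)).sum + PySem.Str.len words[k]
          = (List.take (k + 1) (List.map PySem.Str.len words)).sum := by
        rw [List.sum_take_succ _ k (by simpa using hklt), hgk]
      have hih := ih (k + 1) (by omega) (by omega)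
      rw [List.map_take] at hih ⊢
      rw [hS1, pv_diff, pv_diff, hih]

theorem pv_main : ∀ (words : List String), split_line_balanced words = split_line_balanced_alt words := by
  intro words
  have h := pv_loop_eq words words.length 0 (Nat.zero_le _) (by omega)
  simpa [split_line_balanced, split_line_balanced_alt] using h

-- ===== VERDICT (by name: the statement is the Claim_ definition above) =====
theorem split_line_balanced_spec : Claim_equal_split_line_balanced := by
  intro words _
  unfold Spec_split_line_balanced
  exact pv_main words
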